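-- pv_equiv track=rewrite | github.com/marcgeld/Building-AI-Elements-of-AI | 7_Flip_the_coin.py | count
-- ===== SOURCE A (Python) =====
-- def count(seq):
--     seq_str = ''.join(map(str, seq))  # Convert sequence to a string
--     cnt = 0
--
--     # Sliding window search and to count not only distinct occurrences
--     idx = 0
--     while idx <= len(seq_str) - 5:
--         if seq_str[idx:idx + 5] == "11111":
--             cnt += 1
--             idx += 1
--         else:
--             idx += 1
--     return cnt
-- ===== SOURCE B (Python) =====
-- def count(seq):
--     seq_str = ''.join(map(str, seq))  # Convert sequence to a string
--     cnt = 0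
--     run = 0  # length of the current run of consecutive '1' characters
--     for ch in seq_str:
--         if ch == '1':
--             run += 1
--             if run >= 5:
--                 cnt += 1
--         else:
--             run = 0
--     return cnt
-- ===== Notes on version B (the rewrite author's own statement) =====
-- stated objective: simpler
-- what changed: Replaced the index-based sliding-window loop that re-compares a freshly built 5-character slice at every position with a single stateful scan keeping the length of the current run of '1's and counting each position where the run reaches 5 (one char comparison per position, no slicing).
import Mathlib
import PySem

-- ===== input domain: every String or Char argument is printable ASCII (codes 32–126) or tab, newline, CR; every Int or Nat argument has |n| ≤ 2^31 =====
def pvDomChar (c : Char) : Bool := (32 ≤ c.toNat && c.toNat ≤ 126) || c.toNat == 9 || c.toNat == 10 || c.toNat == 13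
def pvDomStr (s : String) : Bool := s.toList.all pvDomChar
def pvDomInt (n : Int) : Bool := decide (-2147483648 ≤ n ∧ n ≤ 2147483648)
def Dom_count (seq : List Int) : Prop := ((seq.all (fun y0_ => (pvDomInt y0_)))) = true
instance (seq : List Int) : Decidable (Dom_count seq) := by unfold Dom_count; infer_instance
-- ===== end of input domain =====

-- B changes A's repeated 5-character window comparisons into one run-length scan; objective: simpler.

-- ===== PORT A =====
-- while idx <= len(seq_str) - 5: compare seq_str[idx:idx+5] with "11111", idx += 1
def countWhile (s : List Char) (idx : Nat) : Int :=
  if idx + 5 ≤ s.length then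
    (if PySem.List.slice s (some (idx : Int)) (some ((idx : Int) + 5)) = ['1','1','1','1','1']
      then 1 + countWhile s (idx + 1) else countWhile s (idx + 1))
  else 0
termination_by s.length - idx

def count (seq : List Int) : Int :=
  countWhile (PySem.Chars.join [] (seq.map PySem.Int.toChars)) 0

-- ===== PORT B =====
-- for ch in seq_str: maintain run of consecutive '1's, count whenever run >= 5
def altLoop (s : List Char) (run cnt : Int) : Int :=
  match s with
  | [] => cnt
  | c :: t =>
    if c = '1' then altLoop t (run + 1) (if run + 1 ≥ 5 then cnt + 1 else cnt)
    else altLoop t 0 cnt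

def count_alt (seq : List Int) : Int :=
  altLoop (PySem.Chars.join [] (seq.map PySem.Int.toChars)) 0 0

-- ===== PRECONDITION & SPEC =====
def Spec_count (seq : List Int) (out : Int) : Prop := out = count_alt seq
instance (seq : List Int) (out : Int) : Decidable (Spec_count seq out) := by unfold Spec_count; infer_instance

-- ===== CLAIM (what is proved, stated in full; the proofs are below) =====
def Claim_equal_count : Prop := ∀ (seq : List Int), Dom_count seq → Spec_count seq (count seq)

-- ===== LEMMAS AND PROOFS =====

-- common spec: number of window starts (cw peels one position per step)
def cw : List Char → Int
  | [] => 0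
  | c :: t => (if (c :: t).take 5 = ['1','1','1','1','1'] then 1 else 0) + cw t

theorem cw_short (s : List Char) (h : s.length < 5) : cw s = 0 := by
  induction s with
  | nil => rfl
  | cons c t ih =>
    have ht : t.length < 5 := by simp at h; omega
    have hne : ¬ (c :: t).take 5 = ['1','1','1','1','1'] := by
      intro he
      have := congrArg List.length he
      simp [List.length_take] at this h
      omega
    simp only [cw, ih ht, if_neg hne]
    norm_num

theorem countWhile_eq_cw (s : List Char) (idx : Nat) :
    countWhile s idx = cw (s.drop idx) := by
  by_cases h : idx + 5 ≤ s.length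
  · have hlt : idx < s.length := by omega
    have hdrop : s.drop idx = s[idx] :: s.drop (idx + 1) :=
      List.drop_eq_getElem_cons hlt
    have hslice : PySem.List.slice s (some (idx : Int)) (some ((idx : Int) + 5))
        = (s.drop idx).take 5 := by
      have := PySem.List.slice_natCast_add s idx 5
      simpa using this
    rw [countWhile, if_pos h, hslice, countWhile_eq_cw s (idx + 1), hdrop]
    simp only [cw, ← hdrop]
    split <;> omega
  · rw [countWhile, if_neg h, cw_short]
    simp; omega
termination_by s.length - idx

theorem cw_five (t : List Char) :
    cw (List.replicate 5 '1' ++ t) = 1 + cw (List.replicate 4 '1' ++ t) := by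
  simp [List.replicate, cw]

theorem cw_skip (c : Char) (t : List Char) (hc : c ≠ '1') (r : Nat) (hr : r ≤ 4) :
    cw (List.replicate r '1' ++ c :: t) = cw t := by
  interval_cases r <;> simp [List.replicate, cw, hc]

theorem altLoop_one (t : List Char) (r cnt : Int) :
    altLoop ('1' :: t) r cnt = altLoop t (r + 1) (if r + 1 ≥ 5 then cnt + 1 else cnt) := by
  rw [altLoop]; rw [if_pos rfl]

theorem altLoop_other {c : Char} (hc : c ≠ '1') (t : List Char) (r cnt : Int) :
    altLoop (c :: t) r cnt = altLoop t 0 cnt := by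
  rw [altLoop]; rw [if_neg hc]

theorem altLoop_eq_cw (s : List Char) (r : Nat) (cnt : Int) :
    altLoop s (r : Int) cnt = cnt + cw (List.replicate (min r 4) '1' ++ s) := by
  induction s generalizing r cnt with
  | nil =>
    rw [altLoop, cw_short _ (by simp)]
    omega
  | cons c t ih =>
    by_cases hc : c = '1'
    · subst hc
      have hcast : (r : Int) + 1 = ((r + 1 : Nat) : Int) := by push_cast; ring
      rw [altLoop_one, hcast, ih (r + 1)]
      by_cases h4 : r ≥ 4
      · have h1 : min (r + 1) 4 = 4 := by omega
        have h2 : min r 4 = 4 := by omega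
        have h5 : ((r + 1 : Nat) : Int) ≥ 5 := by push_cast; omega
        rw [if_pos h5, h1, h2]
        have hx : List.replicate 4 '1' ++ '1' :: t = List.replicate 5 '1' ++ t := by
          simp [List.replicate]
        rw [hx, cw_five]; ring
      · have h1 : min (r + 1) 4 = r + 1 := by omega
        have h2 : min r 4 = r := by omega
        have h5 : ¬ ((r + 1 : Nat) : Int) ≥ 5 := by push_cast; omega
        rw [if_neg h5, h1, h2]
        have hx : List.replicate r '1' ++ '1' :: t = List.replicate (r + 1) '1' ++ t := by
          rw [show r + 1 = r + 1 from rfl, List.replicate_succ', List.append_assoc]; rfl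
        rw [hx]
    · rw [altLoop_other hc]
      have h0 := ih 0 cnt
      simp only [Nat.cast_zero] at h0
      have h0' : List.replicate (min 0 4) '1' ++ t = t := rfl
      rw [h0' ] at h0
      rw [h0, cw_skip c t hc (min r 4) (by omega)]

-- ===== VERDICT (by name: the statement is the Claim_ definition above) =====
theorem count_spec : Claim_equal_count := by
  intro seq _
  unfold Spec_count count count_alt
  rw [countWhile_eq_cw, List.drop_zero]
  have := altLoop_eq_cw (PySem.Chars.join [] (seq.map PySem.Int.toChars)) 0 0
  simp only [Nat.cast_zero] at this
  rw [this]
  simp
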